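-- pv_equiv track=rewrite | github.com/TechnoVar-197/Simplification-of-Grammar | cgl.py | cfl_to_cfg
-- ===== SOURCE A (Python) =====
-- from collections import defaultdict
--
-- def cfl_to_cfg(cfl):
--     # Define a dictionary to store CFG rules
--     cfg_rules = defaultdict(list)
--
--     # Process CFL rules and convert them to CFG rules
--     for rule in cfl:
--         non_terminal, productions = rule.split(' -> ')
--         production_list = productions.split(' | ')
--         for production in production_list:
--             # Add the production to the corresponding non-terminal
--             cfg_rules[non_terminal].append(production)
--
--     # Create a list to store the CFG rules in the required format
--     cfg_rules_list = []
--
--     for non_terminal, productions in cfg_rules.items():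
--         for production in productions:
--             cfg_rules_list.append(f"{non_terminal} -> {production}")
--
--     return cfg_rules_list
-- ===== SOURCE B (Python) =====
-- def cfl_to_cfg(cfl):
--     # Parse each rule once; then group by non-terminal in first-appearance order
--     # by rescanning the parsed list (no dict).
--     parsed = []
--     for rule in cfl:
--         non_terminal, productions = rule.split(' -> ')
--         parsed.append((non_terminal, productions.split(' | ')))
--     order = []
--     for non_terminal, _ in parsed:
--         if non_terminal not in order:
--             order.append(non_terminal)
--     result = []
--     for non_terminal in order:
--         for nt, productions in parsed:
--             if nt == non_terminal:
--                 for production in productions: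
--                     result.append(f"{non_terminal} -> {production}")
--     return result
-- ===== Notes on version B (the rewrite author's own statement) =====
-- stated objective: alternative
-- what changed: B replaces the defaultdict grouping with a parse-once pass, an ordered list of distinct non-terminals, and a rescan of the parsed rules per non-terminal to emit the grouped output.
import Mathlib
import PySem

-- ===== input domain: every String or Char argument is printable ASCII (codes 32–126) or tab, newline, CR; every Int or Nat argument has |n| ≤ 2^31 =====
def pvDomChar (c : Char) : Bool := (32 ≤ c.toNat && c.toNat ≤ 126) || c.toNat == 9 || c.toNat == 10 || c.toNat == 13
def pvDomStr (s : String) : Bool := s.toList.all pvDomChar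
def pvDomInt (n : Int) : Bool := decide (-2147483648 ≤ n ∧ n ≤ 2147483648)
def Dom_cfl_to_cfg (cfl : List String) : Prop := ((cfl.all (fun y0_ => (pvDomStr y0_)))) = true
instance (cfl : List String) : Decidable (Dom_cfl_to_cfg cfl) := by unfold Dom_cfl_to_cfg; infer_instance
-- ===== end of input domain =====

-- B groups the productions by scanning an ordered list of distinct non-terminals over the
-- parsed rules instead of building a defaultdict; alternative decomposition, same results.

-- shared parsing step of both Pythons: "nt, prods = rule.split(' -> ')" + "prods.split(' | ')"
-- (the `_` branch is where Python's tuple unpacking raises ValueError; unreachable under Pre_)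
def parseRule (rule : String) : String × List String :=
  match PySem.Str.split? rule " -> " with
  | some [nonTerminal, productions] =>
      (nonTerminal, (PySem.Str.split? productions " | ").getD [])
  | _ => ("", [])

-- ===== PORT A =====
def cfl_to_cfg (cfl : List String) : List String :=
  let cfgRules : PySem.Dict String (List String) :=
    cfl.foldl (fun d rule =>
      let pr := parseRule rule
      pr.2.foldl (fun d production => d.modify pr.1 [] (· ++ [production])) d)
      PySem.Dict.empty
  cfgRules.items.foldl (fun acc kv =>
    kv.2.foldl (fun acc production => acc ++ [kv.1 ++ " -> " ++ production]) acc) []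

-- ===== PORT B =====
def cfl_to_cfg_alt (cfl : List String) : List String :=
  let parsed := cfl.map parseRule
  let order := parsed.foldl (fun ord pr => if pr.1 ∈ ord then ord else ord ++ [pr.1]) []
  order.foldl (fun res nonTerminal =>
    parsed.foldl (fun res pr =>
      if pr.1 = nonTerminal then
        pr.2.foldl (fun res production => res ++ [nonTerminal ++ " -> " ++ production]) res
      else res) res) []

-- ===== PRECONDITION & SPEC =====
-- Pre_ excludes exactly the inputs on which Python A raises ValueError: a rule whose
-- split on ' -> ' does not yield exactly two pieces (B raises there too).
def Pre_cfl_to_cfg (cfl : List String) : Prop :=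
  ∀ rule ∈ cfl, ((PySem.Str.split? rule " -> ").getD []).length = 2
instance (cfl : List String) : Decidable (Pre_cfl_to_cfg cfl) := by
  unfold Pre_cfl_to_cfg; infer_instance

def pvWitness_cfl_to_cfg : List String := ["S -> a S b | b", "A -> c", "S -> d"]

def Spec_cfl_to_cfg (cfl : List String) (out : List String) : Prop := out = cfl_to_cfg_alt cfl
instance (cfl : List String) (out : List String) : Decidable (Spec_cfl_to_cfg cfl out) := by
  unfold Spec_cfl_to_cfg; infer_instance

-- ===== CLAIM (what is proved, stated in full; the proofs are below) =====
def Claim_equal_cfl_to_cfg : Prop :=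
  ∀ (cfl : List String), Dom_cfl_to_cfg cfl → Pre_cfl_to_cfg cfl →
    Spec_cfl_to_cfg cfl (cfl_to_cfg cfl)

-- ===== LEMMAS AND PROOFS =====

-- splitOn's worker never returns an empty list of pieces
theorem pvGoNeNil (sep : List Char) : ∀ (fuel : Nat) (l cur : List Char) (acc : List (List Char)),
    PySem.Chars.splitOn.go sep fuel l cur acc ≠ [] := by
  intro fuel
  induction fuel with
  | zero => intro l cur acc; simp [PySem.Chars.splitOn.go]
  | succ n ih =>
    intro l cur acc
    cases l with
    | nil => simp [PySem.Chars.splitOn.go]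
    | cons c rest =>
      simp only [PySem.Chars.splitOn.go]
      split
      · exact ih _ _ _
      · exact ih _ _ _

theorem pvSplitBar (s : String) :
    ∃ l, PySem.Str.split? s " | " = some l ∧ l ≠ [] := by
  have hsep : (" | " : String).toList = [' ', '|', ' '] := rfl
  refine ⟨(PySem.Chars.splitOn s.toList [' ', '|', ' ']).map String.ofList, ?_, ?_⟩
  · simp [PySem.Str.split?, PySem.Chars.split?, hsep]
  · simp only [ne_eq, List.map_eq_nil_iff]
    unfold PySem.Chars.splitOn
    exact pvGoNeNil _ _ _ _ _

theorem pvParseSnd (rule : String)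
    (h : ((PySem.Str.split? rule " -> ").getD []).length = 2) :
    (parseRule rule).2 ≠ [] := by
  obtain ⟨a, b, hab⟩ : ∃ a b, PySem.Str.split? rule " -> " = some [a, b] := by
    cases hs : PySem.Str.split? rule " -> " with
    | none => rw [hs] at h; simp at h
    | some l =>
      rw [hs] at h; simp at h
      match l, h with
      | [a, b], _ => exact ⟨a, b, rfl⟩
  obtain ⟨l, hl, hne⟩ := pvSplitBar b
  simp [parseRule, hab, hl, hne]

-- abstract forms of the two programs over the parsed rule list
def pvPairs (ps : List (String × List String)) : List (String × String) :=
  ps.flatMap (fun pr => pr.2.map (fun p => (pr.1, p)))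

def pvGroup (ps : List (String × List String)) (c : String) : List String :=
  ps.flatMap (fun pr => if pr.1 = c then pr.2 else [])

theorem pvBuildFlat (cfl : List String) (d : PySem.Dict String (List String)) :
    cfl.foldl (fun d rule =>
        let pr := parseRule rule
        pr.2.foldl (fun d production => d.modify pr.1 [] (· ++ [production])) d) d
      = (pvPairs (cfl.map parseRule)).foldl
          (fun d q => d.modify q.1 [] (· ++ [q.2])) d := by
  induction cfl generalizing d with
  | nil => simp [pvPairs]
  | cons r rest ih =>
    simp only [List.foldl_cons, List.map_cons, pvPairs, List.flatMap_cons, List.foldl_append]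
    rw [ih]
    simp [pvPairs, List.foldl_map]

theorem pvMapFstPairs (ps : List (String × List String)) :
    (pvPairs ps).map Prod.fst = ps.flatMap (fun pr => pr.2.map (fun _ => pr.1)) := by
  simp [pvPairs, List.map_flatMap]

theorem pvUpdateConst (b : List String) (nt : String) (s : PySem.Set String) (h : b ≠ []) :
    PySem.Set.update s (b.map (fun _ => nt)) = PySem.Set.add s nt := by
  induction b generalizing s with
  | nil => exact absurd rfl h
  | cons x tl ih =>
    by_cases htl : tl = []
    · subst htl
      rw [List.map_cons, List.map_nil, PySem.Set.update_cons, PySem.Set.update_nil]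
    · rw [List.map_cons, PySem.Set.update_cons, ih (PySem.Set.add s nt) htl]
      exact PySem.Set.add_of_mem ((PySem.Set.mem_add s nt nt).mpr (Or.inr rfl))

theorem pvUpdateFlat (ps : List (String × List String)) :
    ∀ (s : PySem.Set String), (∀ pr ∈ ps, pr.2 ≠ []) →
      PySem.Set.update s (ps.flatMap (fun pr => pr.2.map (fun _ => pr.1)))
        = PySem.Set.update s (ps.map (·.1)) := by
  induction ps with
  | nil => intro s _; rfl
  | cons pr rest ih =>
    intro s h
    rw [List.flatMap_cons, PySem.Set.update_append,
      pvUpdateConst pr.2 pr.1 s (h pr (by simp)),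
      List.map_cons, PySem.Set.update_cons,
      ih _ (fun q hq => h q (by simp [hq]))]

theorem pvFilterPairs (ps : List (String × List String)) (c : String) :
    ((pvPairs ps).filter (fun q => q.1 == c)).map (·.2) = pvGroup ps c := by
  induction ps with
  | nil => simp [pvPairs, pvGroup]
  | cons pr rest ih =>
    simp only [pvPairs, pvGroup, List.flatMap_cons, List.filter_append, List.map_append] at *
    rw [ih]
    congr 1
    by_cases h : pr.1 = c
    · simp [h, List.filter_map, Function.comp]
    · simp [h, List.filter_map, Function.comp]

theorem pvOutShape (items : List (String × List String)) :
    ∀ (init : List String),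
      items.foldl (fun acc kv =>
          kv.2.foldl (fun acc production => acc ++ [kv.1 ++ " -> " ++ production]) acc) init
        = init ++ items.flatMap (fun kv => kv.2.map (fun p => kv.1 ++ " -> " ++ p)) := by
  induction items with
  | nil => simp
  | cons kv rest ih =>
    intro init
    rw [List.foldl_cons, PySem.List.foldl_append_singleton_eq_map, ih, List.flatMap_cons,
      List.append_assoc]

theorem pvMidShape (parsed : List (String × List String)) (nt : String) :
    ∀ (init : List String),
      parsed.foldl (fun res pr =>
          if pr.1 = nt then
            pr.2.foldl (fun res production => res ++ [nt ++ " -> " ++ production]) res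
          else res) init
        = init ++ parsed.flatMap (fun pr =>
            if pr.1 = nt then pr.2.map (fun p => nt ++ " -> " ++ p) else []) := by
  induction parsed with
  | nil => simp
  | cons pr rest ih =>
    intro init
    rw [List.foldl_cons, List.flatMap_cons]
    by_cases h : pr.1 = nt
    · rw [if_pos h, if_pos h, PySem.List.foldl_append_singleton_eq_map, ih, List.append_assoc]
    · rw [if_neg h, if_neg h, ih]; simp

theorem pvOuterShape (order : List String) (parsed : List (String × List String)) :
    ∀ (init : List String),
      order.foldl (fun res nonTerminal =>
          parsed.foldl (fun res pr =>
            if pr.1 = nonTerminal then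
              pr.2.foldl (fun res production => res ++ [nonTerminal ++ " -> " ++ production]) res
            else res) res) init
        = init ++ order.flatMap (fun nt => parsed.flatMap (fun pr =>
            if pr.1 = nt then pr.2.map (fun p => nt ++ " -> " ++ p) else [])) := by
  induction order with
  | nil => simp
  | cons nt rest ih =>
    intro init
    rw [List.foldl_cons, pvMidShape, ih, List.flatMap_cons, List.append_assoc]

-- ===== VERDICT (by name: the statement is the Claim_ definition above) =====
theorem cfl_to_cfg_spec : Claim_equal_cfl_to_cfg := by
  intro cfl _ hpre
  unfold Spec_cfl_to_cfg
  simp only [cfl_to_cfg, cfl_to_cfg_alt]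
  rw [pvBuildFlat, pvOuterShape]
  set ps := cfl.map parseRule with hps
  have hne : ∀ pr ∈ ps, pr.2 ≠ [] := by
    intro pr hpr
    obtain ⟨rule, hr, hrep⟩ := List.mem_map.mp hpr
    exact hrep ▸ pvParseSnd rule (hpre rule hr)
  have hkeys : (List.foldl (fun d q => d.modify q.1 [] (· ++ [q.2]))
        PySem.Dict.empty (pvPairs ps)).keys
      = PySem.Set.update [] (ps.map (·.1)) := by
    have hk0 : (List.foldl (fun d q => d.modify q.1 [] (· ++ [q.2]))
          PySem.Dict.empty (pvPairs ps)).keys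
        = PySem.Set.update PySem.Dict.empty.keys ((pvPairs ps).map Prod.fst) :=
      PySem.Dict.keys_foldl_modify_key (pvPairs ps) Prod.fst []
        (fun _ (q : String × String) => (· ++ [q.2])) PySem.Dict.empty
    rw [hk0, PySem.Dict.keys_empty, pvMapFstPairs, pvUpdateFlat ps [] hne]
  have hnodup : (List.foldl (fun d q => d.modify q.1 [] (· ++ [q.2]))
        PySem.Dict.empty (pvPairs ps)).keys.Nodup :=
    PySem.Dict.nodup_keys_foldl_modify_key (pvPairs ps) Prod.fst []
      (fun _ (q : String × String) => (· ++ [q.2])) PySem.Dict.empty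
      (by rw [PySem.Dict.keys_empty]; exact List.nodup_nil)
  have hget : ∀ c, (List.foldl (fun d q => d.modify q.1 [] (· ++ [q.2]))
        PySem.Dict.empty (pvPairs ps)).getD c [] = pvGroup ps c := by
    intro c
    rw [PySem.Dict.getD_foldl_modify_append, PySem.Dict.getD_empty, List.nil_append,
      ← pvFilterPairs]
  have hitems : (List.foldl (fun d q => d.modify q.1 [] (· ++ [q.2]))
        PySem.Dict.empty (pvPairs ps)).items
      = (PySem.Set.update [] (ps.map (·.1))).map (fun c => (c, pvGroup ps c)) := by
    rw [PySem.Dict.items_eq_map_keys _ hnodup [], hkeys]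
    exact List.map_congr_left (fun c _ => by rw [hget c])
  have horder : ps.foldl (fun ord pr => if pr.1 ∈ ord then ord else ord ++ [pr.1]) []
      = PySem.Set.update [] (ps.map (·.1)) := by
    have hstep : (fun (ord : List String) (pr : String × List String) =>
        if pr.1 ∈ ord then ord else ord ++ [pr.1])
        = (fun ord pr => PySem.Set.add ord pr.1) := by
      funext ord pr; rw [PySem.Set.add_eq_ite]
    rw [hstep, ← PySem.Set.update_map_eq_foldl_add]
  have hpt : (fun c => (pvGroup ps c).map (fun p => c ++ " -> " ++ p))
      = (fun nt => ps.flatMap (fun pr =>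
          if pr.1 = nt then pr.2.map (fun p => nt ++ " -> " ++ p) else [])) := by
    funext c
    simp only [pvGroup, List.map_flatMap, apply_ite (List.map (fun p => c ++ " -> " ++ p)),
      List.map_nil]
  rw [pvOutShape, hitems, horder, List.nil_append, List.nil_append, List.flatMap_map]
  simp only [hpt]
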